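-- pv_equiv track=rewrite | github.com/AnirudhNarasimhamurthy/Natural-Language-Processing-Fall-2015 | Project/QP.py | question_parser
-- ===== SOURCE A (Python) =====
-- def question_parser(question_list):
--
--     questionID_list=[]
--     q_list=[]
--     '''print len(question_list)
--     for i in range(0, len(question_list)):
--         print i, question_list[i]'''
--     for i in range(0, len(question_list)):
--         if i%4==0:
--             questionID_list.append(question_list[i])
--         elif i%4==1:
--             q_list.append(question_list[i])
--
--     return questionID_list,q_list
-- ===== SOURCE B (Python) =====
-- def question_parser(question_list):
--     return question_list[0::4], question_list[1::4]
-- ===== Notes on version B (the rewrite author's own statement) =====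
-- stated objective: idiomatic
-- what changed: Replaces the single Python-level index loop with modulo dispatch and per-element appends by two independent strided slices (question_list[0::4], question_list[1::4]), each a single C-level pass.
import Mathlib
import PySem

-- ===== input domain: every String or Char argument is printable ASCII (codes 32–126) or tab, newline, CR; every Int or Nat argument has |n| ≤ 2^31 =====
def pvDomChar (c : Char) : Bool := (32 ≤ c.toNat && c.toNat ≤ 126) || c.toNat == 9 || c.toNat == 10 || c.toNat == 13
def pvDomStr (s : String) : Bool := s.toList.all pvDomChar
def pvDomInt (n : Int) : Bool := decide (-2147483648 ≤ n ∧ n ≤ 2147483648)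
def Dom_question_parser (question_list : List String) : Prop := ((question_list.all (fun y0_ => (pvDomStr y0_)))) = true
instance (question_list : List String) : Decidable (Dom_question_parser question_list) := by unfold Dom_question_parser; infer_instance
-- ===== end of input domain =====

-- B replaces A's single modulo-dispatch index loop by two independent strided slices ([0::4] and [1::4]); idiomatic, same O(n) cost.


-- ===== PORT A =====
def question_parser (question_list : List String) : List String × List String :=
  let questionID_list : List String := []
  let q_list : List String := []
  let p :=
    (PySem.List.pyRange 0 (PySem.List.len question_list) 1).foldl
      (fun (acc : List String × List String) i =>
        if PySem.Int.mod i 4 = 0 then (acc.1 ++ [PySem.List.pyGetD question_list i ""], acc.2)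
        else if PySem.Int.mod i 4 = 1 then (acc.1, acc.2 ++ [PySem.List.pyGetD question_list i ""])
        else acc)
      (questionID_list, q_list)
  (p.1, p.2)

-- ===== PORT B =====
def question_parser_alt (question_list : List String) : List String × List String :=
  ((PySem.List.slice? question_list (some 0) none 4).getD [],
   (PySem.List.slice? question_list (some 1) none 4).getD [])

-- ===== PRECONDITION & SPEC =====
def Spec_question_parser (question_list : List String) (out : List String × List String) : Prop := out = question_parser_alt question_list
instance (question_list : List String) (out : List String × List String) : Decidable (Spec_question_parser question_list out) := by unfold Spec_question_parser; infer_instance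

-- ===== CLAIM (what is proved, stated in full; the proofs are below) =====
def Claim_equal_question_parser : Prop := ∀ (question_list : List String), Dom_question_parser question_list → Spec_question_parser question_list (question_parser question_list)

-- ===== LEMMAS AND PROOFS =====

-- canonical "every 4th element" spec, used to relate both ports
def take4 : List String → List String
  | [] => []
  | x :: t => x :: take4 (t.drop 3)
termination_by l => l.length
decreasing_by simp

theorem take4_nil : take4 [] = [] := by simp [take4]

theorem take4_drop_nil (full : List String) (s : Nat) (h : full.length ≤ s) :
    take4 (full.drop s) = [] := by
  rw [List.drop_eq_nil_of_le h, take4_nil]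

theorem take4_drop (full : List String) (s : Nat) (h : s < full.length) :
    take4 (full.drop s) = full[s] :: take4 (full.drop (s + 4)) := by
  rw [List.drop_eq_getElem_cons h, take4, List.drop_drop]

theorem mod_cast4 (s : Nat) : PySem.Int.mod ((s : Nat) : Int) 4 = ((s % 4 : Nat) : Int) := by
  rw [PySem.Int.mod_eq_emod_of_pos (by norm_num)]
  omega

theorem A_key (fuel : Nat) : ∀ (full : List String) (s : Nat), full.length - s ≤ fuel → s % 4 = 0 →
    ∀ (a b : List String),
      (PySem.List.pyRange (s : Int) (full.length : Int) 1).foldl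
        (fun (acc : List String × List String) i =>
          if PySem.Int.mod i 4 = 0 then (acc.1 ++ [PySem.List.pyGetD full i ""], acc.2)
          else if PySem.Int.mod i 4 = 1 then (acc.1, acc.2 ++ [PySem.List.pyGetD full i ""])
          else acc)
        (a, b)
      = (a ++ take4 (full.drop s), b ++ take4 (full.drop (s + 1))) := by
  induction fuel with
  | zero =>
    intro full s hf _ a b
    have hge : full.length ≤ s := by omega
    rw [PySem.List.pyRange_one_eq_nil (by exact_mod_cast hge)]
    simp [take4_drop_nil full s hge, take4_drop_nil full (s + 1) (by omega)]
  | succ fuel ih =>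
    intro full s hf h4 a b
    rcases (by omega : full.length ≤ s ∨ s < full.length) with hge | hlt
    · rw [PySem.List.pyRange_one_eq_nil (by exact_mod_cast hge)]
      simp [take4_drop_nil full s hge, take4_drop_nil full (s + 1) (by omega)]
    · -- peel index s (s % 4 = 0: goes to the first list)
      rw [PySem.List.pyRange_one_cons (by exact_mod_cast hlt)]
      have hc1 : ((s : Int) + 1) = ((s + 1 : Nat) : Int) := by push_cast; ring
      simp only [List.foldl_cons, mod_cast4 s, h4, Nat.cast_zero, reduceIte,
        PySem.List.pyGetD_natCast, List.getD_eq_getElem full "" hlt, hc1]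
      rcases (by omega : full.length ≤ (s + 1) ∨ (s + 1) < full.length) with hge1 | hlt1
      · rw [PySem.List.pyRange_one_eq_nil (by exact_mod_cast hge1)]
        simp [take4_drop full s hlt, take4_drop_nil full (s + 4) (by omega),
          take4_drop_nil full (s + 1) hge1]
      · -- peel index s+1 (goes to the second list)
        rw [PySem.List.pyRange_one_cons (by exact_mod_cast hlt1)]
        have h41 : (s + 1) % 4 = 1 := by omega
        have hc2 : (((s + 1 : Nat) : Int) + 1) = ((s + 2 : Nat) : Int) := by push_cast; ring
        simp only [List.foldl_cons, mod_cast4 (s + 1), h41, Nat.cast_one, reduceIte,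
          PySem.List.pyGetD_natCast, List.getD_eq_getElem full "" hlt1, hc2]
        rcases (by omega : full.length ≤ (s + 2) ∨ (s + 2) < full.length) with hge2 | hlt2
        · rw [PySem.List.pyRange_one_eq_nil (by exact_mod_cast hge2)]
          simp [take4_drop full s hlt, take4_drop full (s + 1) hlt1,
            take4_drop_nil full (s + 4) (by omega), take4_drop_nil full (s + 5) (by omega)]
        · -- peel index s+2 (skipped)
          rw [PySem.List.pyRange_one_cons (by exact_mod_cast hlt2)]
          have h42 : (s + 2) % 4 = 2 := by omega
          have hc3 : (((s + 2 : Nat) : Int) + 1) = ((s + 3 : Nat) : Int) := by push_cast; ring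
          simp only [List.foldl_cons, mod_cast4 (s + 2), h42, Nat.cast_ofNat, hc3]
          rcases (by omega : full.length ≤ (s + 3) ∨ (s + 3) < full.length) with hge3 | hlt3
          · rw [PySem.List.pyRange_one_eq_nil (by exact_mod_cast hge3)]
            simp [take4_drop full s hlt, take4_drop full (s + 1) hlt1,
              take4_drop_nil full (s + 4) (by omega), take4_drop_nil full (s + 5) (by omega)]
          · -- peel index s+3 (skipped), then recurse at s+4
            rw [PySem.List.pyRange_one_cons (by exact_mod_cast hlt3)]
            have h43 : (s + 3) % 4 = 3 := by omega
            have hc4 : (((s + 3 : Nat) : Int) + 1) = ((s + 4 : Nat) : Int) := by push_cast; ring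
            simp only [List.foldl_cons, mod_cast4 (s + 3), h43, Nat.cast_ofNat, hc4]
            rw [ih full (s + 4) (by omega) (by omega)]
            simp [take4_drop full s hlt, take4_drop full (s + 1) hlt1]

theorem stride_fm (fuel : Nat) : ∀ (full : List String) (s : Nat), full.length - s ≤ fuel →
    s < full.length →
    List.filterMap (fun (x : Nat) => full[((s : Int) + 4 * (x : Int)).toNat]?)
      (List.range (((full.length : Int) - (s : Int) + 4 - 1) / 4).toNat)
    = take4 (full.drop s) := by
  induction fuel with
  | zero => intro full s hf hlt; omega
  | succ fuel ih =>
    intro full s hf hlt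
    have hc : ((((full.length : Int)) - (s : Int) + 4 - 1) / 4).toNat
        = ((((full.length : Int)) - ((s + 4 : Nat) : Int) + 4 - 1) / 4).toNat + 1 := by
      push_cast; omega
    rw [hc, List.range_succ_eq_map, List.filterMap_cons, List.filterMap_map]
    have hfs : ((fun x : Nat => full[((s : Int) + 4 * (x : Int)).toNat]?) ∘ Nat.succ)
        = (fun x : Nat => full[(((s + 4 : Nat) : Int) + 4 * (x : Int)).toNat]?) := by
      funext k
      simp only [Function.comp]
      congr 1
      push_cast
      omega
    rw [hfs]
    have hf0 : ((s : Int) + 4 * ((0 : Nat) : Int)).toNat = s := by omega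
    simp only [hf0, List.getElem?_eq_getElem hlt]
    rw [take4_drop full s hlt]
    rcases (by omega : full.length ≤ s + 4 ∨ s + 4 < full.length) with hge4 | hlt4
    · have h0 : ((((full.length : Int)) - ((s + 4 : Nat) : Int) + 4 - 1) / 4).toNat = 0 := by
        push_cast; omega
      rw [h0]
      simp [take4_drop_nil full (s + 4) hge4]
    · rw [ih full (s + 4) (by omega) hlt4]

theorem stride_key (full : List String) (s : Nat) :
    (PySem.List.slice? full (some (s : Int)) none 4).getD [] = take4 (full.drop s) := by
  rcases (by omega : full.length ≤ s ∨ s < full.length) with hge | hlt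
  · simp only [PySem.List.slice?, PySem.List.sliceIndices]
    have h1 : ¬ ((s : Int) < 0) := by omega
    have h2 : min ((s : Int)) ((full.length : Int)) = (full.length : Int) := by omega
    norm_num [h1, h2, take4_drop_nil full s hge]
  · simp only [PySem.List.slice?, PySem.List.sliceIndices]
    have h1 : ¬ ((s : Int) < 0) := by omega
    have h2 : min ((s : Int)) ((full.length : Int)) = (s : Int) := by omega
    have h3 : (s : Int) < (full.length : Int) := by exact_mod_cast hlt
    norm_num [h1, h2, h3]
    exact stride_fm full.length full s (by omega) hlt

-- ===== VERDICT (by name: the statement is the Claim_ definition above) =====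
theorem question_parser_spec : Claim_equal_question_parser := by
  intro xs _
  unfold Spec_question_parser question_parser question_parser_alt
  have hA := A_key xs.length xs 0 (by omega) (by omega) [] []
  have hB0 := stride_key xs 0
  have hB1 := stride_key xs 1
  simp only [Nat.cast_zero, Nat.cast_one, List.drop_zero, List.nil_append] at hA hB0 hB1
  simp only [PySem.List.len_eq, hA, hB0, hB1]
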